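-- pv_equiv track=rewrite | github.com/cammobbmusic-sys/truth-analzyer | verification/conflict_resolver.py | _count_contradictions
-- ===== SOURCE A (Python) =====
-- from typing import Dict, List, Any, Optional, Tuple
--
-- def _count_contradictions(points1: List[str], points2: List[str]) -> int:
--     """Count contradictory statements between two point lists."""
--     # Very basic contradiction detection
--     contradictions = 0
--
--     contradiction_pairs = [
--         ("yes", "no"),
--         ("true", "false"),
--         ("correct", "incorrect"),
--         ("good", "bad"),
--         ("positive", "negative"),
--         ("beneficial", "harmful")
--     ]
--
--     for p1 in points1:
--         for p2 in points2:
--             p1_lower = p1.lower()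
--             p2_lower = p2.lower()
--             for pos, neg in contradiction_pairs:
--                 if (pos in p1_lower and neg in p2_lower) or (neg in p1_lower and pos in p2_lower):
--                     contradictions += 1
--
--     return contradictions
-- ===== SOURCE B (Python) =====
-- def _count_contradictions(points1, points2):
--     """Count contradictory statements between two point lists.
--
--     One pass per list and per contradiction pair: count points containing
--     the positive word, the negative word, and both; combine the per-list
--     counts by inclusion-exclusion instead of scanning all (p1, p2) pairs.
--     """
--     contradiction_pairs = [
--         ("yes", "no"),
--         ("true", "false"),
--         ("correct", "incorrect"),
--         ("good", "bad"),
--         ("positive", "negative"),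
--         ("beneficial", "harmful")
--     ]
--
--     def counts(pos, neg, points):
--         cp = cn = cb = 0
--         for p in points:
--             pl = p.lower()
--             hp = pos in pl
--             hn = neg in pl
--             cp += hp
--             cn += hn
--             cb += hp and hn
--         return cp, cn, cb
--
--     total = 0
--     for pos, neg in contradiction_pairs:
--         cp1, cn1, cb1 = counts(pos, neg, points1)
--         cp2, cn2, cb2 = counts(pos, neg, points2)
--         total += cp1 * cn2 + cn1 * cp2 - cb1 * cb2
--     return total
-- ===== Notes on version B (the rewrite author's own statement) =====
-- stated objective: faster
-- what changed: Instead of testing every (p1, p2) combination, B counts per list and per contradiction pair how many points contain the positive word, the negative word, and both, and combines the counts by inclusion-exclusion (|A or B| = cp1*cn2 + cn1*cp2 - cb1*cb2).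
import Mathlib
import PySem

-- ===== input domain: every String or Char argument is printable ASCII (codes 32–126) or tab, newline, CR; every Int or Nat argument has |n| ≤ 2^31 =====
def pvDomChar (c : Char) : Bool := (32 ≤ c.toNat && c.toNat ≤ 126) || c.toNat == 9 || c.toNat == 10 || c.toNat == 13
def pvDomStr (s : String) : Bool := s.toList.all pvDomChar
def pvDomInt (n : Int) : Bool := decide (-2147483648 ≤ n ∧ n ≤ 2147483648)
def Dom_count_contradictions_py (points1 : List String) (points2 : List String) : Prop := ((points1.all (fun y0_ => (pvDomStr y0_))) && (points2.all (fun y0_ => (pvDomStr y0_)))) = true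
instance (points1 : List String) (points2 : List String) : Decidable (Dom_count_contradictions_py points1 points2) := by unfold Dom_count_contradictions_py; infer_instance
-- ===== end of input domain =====

-- B replaces A's scan over all (p1, p2) combinations by per-list keyword counts combined
-- with inclusion-exclusion; measured faster on large inputs (asymptotic change).

-- ===== PORT A =====
def pvPairsA : List (String × String) :=
  [("yes", "no"), ("true", "false"), ("correct", "incorrect"),
   ("good", "bad"), ("positive", "negative"), ("beneficial", "harmful")]

def count_contradictions_py (points1 : List String) (points2 : List String) : Int :=
  points1.foldl (fun acc p1 =>
    points2.foldl (fun acc p2 =>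
      let p1_lower := PySem.Str.lower p1
      let p2_lower := PySem.Str.lower p2
      pvPairsA.foldl (fun acc pr =>
        if (PySem.Str.isIn pr.1 p1_lower && PySem.Str.isIn pr.2 p2_lower)
            || (PySem.Str.isIn pr.2 p1_lower && PySem.Str.isIn pr.1 p2_lower)
        then acc + 1 else acc) acc) acc) 0

-- ===== PORT B =====
def pvPairsB : List (String × String) :=
  [("yes", "no"), ("true", "false"), ("correct", "incorrect"),
   ("good", "bad"), ("positive", "negative"), ("beneficial", "harmful")]

-- counts(pos, neg, points): (#containing pos, #containing neg, #containing both)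
def pvCounts (pos : String) (neg : String) (points : List String) : Int × Int × Int :=
  points.foldl (fun acc p =>
    let pl := PySem.Str.lower p
    let hp := PySem.Str.isIn pos pl
    let hn := PySem.Str.isIn neg pl
    (acc.1 + (if hp then 1 else 0), acc.2.1 + (if hn then 1 else 0),
     acc.2.2 + (if hp && hn then 1 else 0))) (0, 0, 0)

def count_contradictions_py_alt (points1 : List String) (points2 : List String) : Int :=
  pvPairsB.foldl (fun total pr =>
    let c1 := pvCounts pr.1 pr.2 points1
    let c2 := pvCounts pr.1 pr.2 points2
    total + (c1.1 * c2.2.1 + c1.2.1 * c2.1 - c1.2.2 * c2.2.2)) 0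

-- ===== PRECONDITION & SPEC =====
def Spec_count_contradictions_py (points1 : List String) (points2 : List String) (out : Int) : Prop := out = count_contradictions_py_alt points1 points2
instance (points1 : List String) (points2 : List String) (out : Int) : Decidable (Spec_count_contradictions_py points1 points2 out) := by unfold Spec_count_contradictions_py; infer_instance

-- ===== CLAIM (what is proved, stated in full; the proofs are below) =====
def Claim_equal_count_contradictions_py : Prop := ∀ (points1 : List String) (points2 : List String), Dom_count_contradictions_py points1 points2 → Spec_count_contradictions_py points1 points2 (count_contradictions_py points1 points2)

-- ===== LEMMAS AND PROOFS =====

-- "p contains pr's positive word" / "negative word" (after lowering p)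
def pvP (pr : String × String) (p : String) : Bool := PySem.Str.isIn pr.1 (PySem.Str.lower p)
def pvN (pr : String × String) (p : String) : Bool := PySem.Str.isIn pr.2 (PySem.Str.lower p)
def pvB (pr : String × String) (p : String) : Bool := pvP pr p && pvN pr p

def pvInd (b : Bool) : Int := if b then 1 else 0

-- A's per-(p1,p2,pair) contribution
def pvCind (pr : String × String) (p1 p2 : String) : Int :=
  if (pvP pr p1 && pvN pr p2) || (pvN pr p1 && pvP pr p2) then 1 else 0

lemma pvCountsAux (pos neg : String) (l : List String) : ∀ acc : Int × Int × Int,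
    (l.foldl (fun acc p =>
      let pl := PySem.Str.lower p
      let hp := PySem.Str.isIn pos pl
      let hn := PySem.Str.isIn neg pl
      (acc.1 + (if hp then 1 else 0), acc.2.1 + (if hn then 1 else 0),
       acc.2.2 + (if hp && hn then 1 else 0))) acc)
    = (acc.1 + (l.countP (pvP (pos, neg)) : Int),
       acc.2.1 + (l.countP (pvN (pos, neg)) : Int),
       acc.2.2 + (l.countP (pvB (pos, neg)) : Int)) := by
  induction l with
  | nil => intro acc; simp
  | cons p t ih =>
    intro acc
    simp only [List.foldl_cons, ih, List.countP_cons]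
    cases hP : PySem.Chars.isIn pos.toList (PySem.Chars.lower p.toList) <;>
      cases hN : PySem.Chars.isIn neg.toList (PySem.Chars.lower p.toList) <;>
        simp [pvP, pvN, pvB, hP, hN] <;> omega

lemma pvCounts_eq (pos neg : String) (l : List String) :
    pvCounts pos neg l =
      ((l.countP (pvP (pos, neg)) : Int), (l.countP (pvN (pos, neg)) : Int),
       (l.countP (pvB (pos, neg)) : Int)) := by
  simpa [pvCounts] using pvCountsAux pos neg l (0, 0, 0)

-- pointwise inclusion-exclusion
lemma pvCind_eq (pr : String × String) (p1 p2 : String) :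
    pvCind pr p1 p2 =
      pvInd (pvP pr p1) * pvInd (pvN pr p2) + pvInd (pvN pr p1) * pvInd (pvP pr p2)
        - pvInd (pvB pr p1) * pvInd (pvB pr p2) := by
  unfold pvCind pvB pvInd
  cases pvP pr p1 <;> cases pvN pr p1 <;> cases pvP pr p2 <;> cases pvN pr p2 <;> simp

lemma pvInner_sum (pr : String × String) (p1 : String) (l2 : List String) :
    (l2.map (fun p2 => pvCind pr p1 p2)).sum =
      pvInd (pvP pr p1) * (l2.countP (pvN pr) : Int)
      + pvInd (pvN pr p1) * (l2.countP (pvP pr) : Int)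
      - pvInd (pvB pr p1) * (l2.countP (pvB pr) : Int) := by
  induction l2 with
  | nil => simp
  | cons q t ih =>
    rw [List.map_cons, List.sum_cons, ih, pvCind_eq,
      List.countP_cons, List.countP_cons, List.countP_cons]
    cases hP1 : pvP pr p1 <;> cases hN1 : pvN pr p1 <;> cases hP : pvP pr q <;> cases hN : pvN pr q <;>
      simp [pvB, pvInd, hP1, hN1, hP, hN] <;> omega

lemma pvDouble (pr : String × String) (l1 l2 : List String) :
    (l1.map (fun p1 => (l2.map (fun p2 => pvCind pr p1 p2)).sum)).sum =
      (l1.countP (pvP pr) : Int) * (l2.countP (pvN pr) : Int)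
      + (l1.countP (pvN pr) : Int) * (l2.countP (pvP pr) : Int)
      - (l1.countP (pvB pr) : Int) * (l2.countP (pvB pr) : Int) := by
  induction l1 with
  | nil => simp
  | cons q t ih =>
    rw [List.map_cons, List.sum_cons, ih, pvInner_sum,
      List.countP_cons, List.countP_cons, List.countP_cons]
    cases hP : pvP pr q <;> cases hN : pvN pr q <;>
      simp [pvB, pvInd, hP, hN] <;> ring

-- generic over the pair list: A's triple sum = B's combined counts
lemma pvMain (ps : List (String × String)) (l1 l2 : List String) :
    (l1.map (fun p1 => (l2.map (fun p2 =>
        (ps.map (fun pr => pvCind pr p1 p2)).sum)).sum)).sum =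
      (ps.map (fun pr =>
        (l1.countP (pvP pr) : Int) * (l2.countP (pvN pr) : Int)
        + (l1.countP (pvN pr) : Int) * (l2.countP (pvP pr) : Int)
        - (l1.countP (pvB pr) : Int) * (l2.countP (pvB pr) : Int))).sum := by
  induction ps with
  | nil => simp
  | cons pr ps ih =>
    simp only [List.map_cons, List.sum_cons, PySem.List.sum_map_add_int]
    rw [← ih, ← pvDouble pr l1 l2]

lemma pvA_eq (l1 l2 : List String) :
    count_contradictions_py l1 l2 =
      (l1.map (fun p1 => (l2.map (fun p2 =>
        (pvPairsA.map (fun pr => pvCind pr p1 p2)).sum)).sum)).sum := by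
  unfold count_contradictions_py
  simp only [PySem.List.foldl_if_add_one, PySem.List.foldl_add, zero_add]
  simp [pvCind, pvP, pvN, ← PySem.List.sum_map_ite_one_zero]

lemma pvB_eq (l1 l2 : List String) :
    count_contradictions_py_alt l1 l2 =
      (pvPairsB.map (fun pr =>
        (l1.countP (pvP pr) : Int) * (l2.countP (pvN pr) : Int)
        + (l1.countP (pvN pr) : Int) * (l2.countP (pvP pr) : Int)
        - (l1.countP (pvB pr) : Int) * (l2.countP (pvB pr) : Int))).sum := by
  unfold count_contradictions_py_alt
  simp only [pvCounts_eq, PySem.List.foldl_add, zero_add]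

-- ===== VERDICT (by name: the statement is the Claim_ definition above) =====
theorem count_contradictions_py_spec : Claim_equal_count_contradictions_py := by
  intro l1 l2 _
  unfold Spec_count_contradictions_py
  rw [pvA_eq, pvB_eq, pvMain]
  rfl
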